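-- pv_equiv track=rewrite | github.com/jms7446/hackerrank | beakjoon/p1092.py | solve
-- ===== SOURCE A (Python) =====
-- from heapq import heappush, heappop
--
-- def solve(cranes, boxes):
--     crane_heap = []
--     cranes = sorted(cranes)
--     boxes = sorted(boxes, reverse=True)
--     if cranes[-1] < boxes[0]:
--         return -1
--
--     for box in boxes:
--         while cranes and cranes[-1] >= box:
--             heappush(crane_heap, (0, cranes.pop()))
--         count, crane = heappop(crane_heap)
--         heappush(crane_heap, (count + 1, crane))
--
--     return max(crane_heap)[0]
-- ===== SOURCE B (Python) =====
-- def solve(cranes, boxes):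
--     cs = sorted(cranes, reverse=True)
--     bs = sorted(boxes, reverse=True)
--     if cs[0] < bs[0]:
--         return -1
--     ans = 0
--     p = 0
--     for i, b in enumerate(bs):
--         while p < len(cs) and cs[p] >= b:
--             p += 1
--         need = -(-(i + 1) // p)
--         if need > ans:
--             ans = need
--     return ans
-- ===== Notes on version B (the rewrite author's own statement) =====
-- stated objective: alternative
-- what changed: Replaces A's heap simulation (push cranes able to lift each box, pop-and-increment the least-loaded crane, take the max load) by a two-pointer sweep over the descending sorts that directly computes max_i ceil((i+1)/c_i), where c_i is the number of cranes that can lift the i-th heaviest box; no heap is maintained.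
import Mathlib
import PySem

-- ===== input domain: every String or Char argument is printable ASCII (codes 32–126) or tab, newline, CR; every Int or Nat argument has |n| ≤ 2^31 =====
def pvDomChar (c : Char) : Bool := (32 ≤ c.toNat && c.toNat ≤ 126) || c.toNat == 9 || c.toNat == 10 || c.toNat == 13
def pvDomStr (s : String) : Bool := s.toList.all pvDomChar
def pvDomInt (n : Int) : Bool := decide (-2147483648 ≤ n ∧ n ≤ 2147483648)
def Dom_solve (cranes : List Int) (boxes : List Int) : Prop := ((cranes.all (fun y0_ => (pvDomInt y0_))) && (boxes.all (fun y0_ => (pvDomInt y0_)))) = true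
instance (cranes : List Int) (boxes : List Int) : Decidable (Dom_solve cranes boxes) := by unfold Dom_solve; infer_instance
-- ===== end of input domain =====

-- B replaces A's heap simulation by a two-pointer sweep computing max_i ceil((i+1)/c_i); equivalence of return values is proved below (no argument is mutated observably by either: A sorts copies).

-- ===== PORT A =====
-- heapq on (count, crane) pairs, modelled value-exactly: push = append, pop = remove
-- the lexicographically smallest pair (ties are identical tuples, so any copy is the same value).
def pvHeapLt (a b : Int × Int) : Bool := a.1 < b.1 || (a.1 == b.1 && a.2 < b.2)

def pvHeapMin? (h : List (Int × Int)) : Option (Int × Int) :=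
  h.foldl (fun acc x => match acc with
    | none => some x
    | some m => if pvHeapLt x m then some x else some m) none

def pvHeapMax? (h : List (Int × Int)) : Option (Int × Int) :=
  h.foldl (fun acc x => match acc with
    | none => some x
    | some m => if pvHeapLt m x then some x else some m) none

-- the inner `while cranes and cranes[-1] >= box` loop
def pvFill (cr : List Int) (heap : List (Int × Int)) (box : Int) : List Int × List (Int × Int) :=
  match h : cr.getLast? with
  | none => (cr, heap)
  | some c =>
    if box ≤ c then pvFill cr.dropLast (heap ++ [((0 : Int), c)]) box else (cr, heap)
termination_by cr.length
decreasing_by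
  have hne : cr ≠ [] := by intro e; subst e; simp at h
  have : 0 < cr.length := List.length_pos_iff.mpr hne
  simp [List.length_dropLast]; omega

-- the `for box in boxes` loop; `none` = the (unreachable under Pre_) empty-heap pop
def pvLoop (bs : List Int) (cr : List Int) (heap : List (Int × Int)) : Option (List (Int × Int)) :=
  match bs with
  | [] => some heap
  | box :: rest =>
    let st := pvFill cr heap box
    match pvHeapMin? st.2 with
    | none => none
    | some v => pvLoop rest st.1 ((st.2.erase v) ++ [(v.1 + 1, v.2)])

def solve (cranes : List Int) (boxes : List Int) : Int :=
  let cs := PySem.List.sorted cranes (fun x => x) false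
  let bs := PySem.List.sorted boxes (fun x => x) true
  match PySem.List.pyGet? cs (-1), PySem.List.pyGet? bs 0 with
  | some cmax, some b0 =>
    if cmax < b0 then -1
    else
      match pvLoop bs cs [] with
      | some heap => (match pvHeapMax? heap with | some v => v.1 | none => 0)
      | none => 0
  | _, _ => 0

-- ===== PORT B =====
-- the `while p < len(cs) and cs[p] >= b` pointer advance
def pvAdvance (cs : List Int) (b : Int) (p : Nat) : Nat :=
  if h : p < cs.length then
    if b ≤ cs[p] then pvAdvance cs b (p + 1) else p
  else p
termination_by cs.length - p

-- the `for i, b in enumerate(bs)` loop of Source B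
def pvBLoop (cs : List Int) : List Int → Nat → Nat → Int → Int
  | [], _, _, ans => ans
  | b :: rest, i, p, ans =>
    let p' := pvAdvance cs b p
    let need := -(PySem.Int.floordiv (-((i : Int) + 1)) (p' : Int))
    pvBLoop cs rest (i + 1) p' (if ans < need then need else ans)

def solve_alt (cranes : List Int) (boxes : List Int) : Int :=
  let cs := PySem.List.sorted cranes (fun x => x) true
  let bs := PySem.List.sorted boxes (fun x => x) true
  ((PySem.List.pyGet? cs 0).bind (fun c0 =>
    (PySem.List.pyGet? bs 0).map (fun b0 =>
      if c0 < b0 then -1 else pvBLoop cs bs 0 0 0))).getD 0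

-- ===== PRECONDITION & SPEC =====
-- Pre_ excludes exactly the inputs on which the Python A raises IndexError (empty cranes or empty boxes); B raises there too.
def Pre_solve (cranes : List Int) (boxes : List Int) : Prop := cranes ≠ [] ∧ boxes ≠ []
instance (cranes : List Int) (boxes : List Int) : Decidable (Pre_solve cranes boxes) := by unfold Pre_solve; infer_instance
def pvWitness_solve : List Int × List Int := ([2, 1], [2, 2, 1])

def Spec_solve (cranes : List Int) (boxes : List Int) (out : Int) : Prop := out = solve_alt cranes boxes
instance (cranes : List Int) (boxes : List Int) (out : Int) : Decidable (Spec_solve cranes boxes out) := by unfold Spec_solve; infer_instance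

-- ===== CLAIM (what is proved, stated in full; the proofs are below) =====
def Claim_equal_solve : Prop := ∀ (cranes : List Int) (boxes : List Int), Dom_solve cranes boxes → Pre_solve cranes boxes → Spec_solve cranes boxes (solve cranes boxes)


-- ===== LEMMAS AND PROOFS =====

-- abstractions used by the proofs: the multiset of counts in the heap, via its sum and running max
def pvMaxF (h : List (Int × Int)) : Int := h.foldr (fun x r => max x.1 r) 0
def pvSumF (h : List (Int × Int)) : Int := (h.map Prod.fst).sum

lemma pvFoldrMax_init (t : List (Int × Int)) (a b : Int) :
    t.foldr (fun x r => max x.1 r) (max a b) = max a (t.foldr (fun x r => max x.1 r) b) := by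
  induction t with
  | nil => simp
  | cons x tt ih => simp only [List.foldr_cons, ih]; omega

lemma pvMaxF_concat (h : List (Int × Int)) (x : Int × Int) :
    pvMaxF (h ++ [x]) = max x.1 (pvMaxF h) := by
  have : pvMaxF (h ++ [x]) = h.foldr (fun y r => max y.1 r) (max x.1 0) := by
    simp [pvMaxF, List.foldr_append]
  rw [this, pvFoldrMax_init]; rfl

lemma pvMaxF_erase (h : List (Int × Int)) (v : Int × Int) (hv : v ∈ h) :
    pvMaxF h = max (pvMaxF (h.erase v)) v.1 := by
  induction h with
  | nil => simp at hv
  | cons x t ih =>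
    by_cases hx : x = v
    · subst hx; rw [List.erase_cons_head]; simp only [pvMaxF, List.foldr_cons]; omega
    · have hvt : v ∈ t := by rcases List.mem_cons.mp hv with h' | h' <;> [exact absurd h'.symm hx; exact h']
      rw [List.erase_cons_tail (by simp [hx])]
      simp only [pvMaxF, List.foldr_cons] at *
      rw [ih hvt]; omega

lemma pvSumF_erase (h : List (Int × Int)) (v : Int × Int) (hv : v ∈ h) :
    pvSumF h = pvSumF (h.erase v) + v.1 := by
  induction h with
  | nil => simp at hv
  | cons x t ih =>
    by_cases hx : x = v
    · subst hx; rw [List.erase_cons_head]; simp [pvSumF]; ring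
    · have hvt : v ∈ t := by rcases List.mem_cons.mp hv with h' | h' <;> [exact absurd h'.symm hx; exact h']
      rw [List.erase_cons_tail (by simp [hx])]
      simp only [pvSumF, List.map_cons, List.sum_cons] at *
      rw [ih hvt]; ring

lemma pvSumF_concat (h : List (Int × Int)) (x : Int × Int) :
    pvSumF (h ++ [x]) = pvSumF h + x.1 := by simp [pvSumF]

lemma pvMaxF_zeros (h : List (Int × Int)) (l : List Int) :
    pvMaxF (h ++ l.map (fun c => ((0 : Int), c))) = pvMaxF h := by
  have hz : pvMaxF (l.map (fun c => ((0 : Int), c))) = 0 := by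
    induction l with
    | nil => rfl
    | cons c t ih => simp only [List.map_cons, pvMaxF, List.foldr_cons] at *; omega
  simp only [pvMaxF, List.foldr_append] at *
  rw [hz]

lemma pvSumF_zeros (h : List (Int × Int)) (l : List Int) :
    pvSumF (h ++ l.map (fun c => ((0 : Int), c))) = pvSumF h := by
  simp [pvSumF]
  induction l with
  | nil => rfl
  | cons c t ih => simpa using ih

lemma le_pvMaxF (h : List (Int × Int)) (x : Int × Int) (hx : x ∈ h) : x.1 ≤ pvMaxF h := by
  induction h with
  | nil => simp at hx
  | cons y t ih =>
    rcases List.mem_cons.mp hx with h' | h'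
    · subst h'; simp only [pvMaxF, List.foldr_cons]; omega
    · have := ih h'; simp only [pvMaxF, List.foldr_cons] at *; omega

lemma pv_mul_le_sum (h : List (Int × Int)) (m : Int) (hm : ∀ x ∈ h, m ≤ x.1) :
    m * (h.length : Int) ≤ pvSumF h := by
  induction h with
  | nil => simp [pvSumF]
  | cons x t ih =>
    have h1 := hm x (by simp)
    have h2 := ih (fun y hy => hm y (by simp [hy]))
    simp only [pvSumF, List.map_cons, List.sum_cons, List.length_cons] at *
    push_cast
    nlinarith

lemma pv_sum_le_mul (h : List (Int × Int)) (M : Int) (hM : ∀ x ∈ h, x.1 ≤ M) :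
    pvSumF h ≤ M * (h.length : Int) := by
  induction h with
  | nil => simp [pvSumF]
  | cons x t ih =>
    have h1 := hM x (by simp)
    have h2 := ih (fun y hy => hM y (by simp [hy]))
    simp only [pvSumF, List.map_cons, List.sum_cons, List.length_cons] at *
    push_cast
    nlinarith

-- pvHeapMin? returns a member whose count is minimal
lemma pvHeapMin?_aux (t : List (Int × Int)) : ∀ m : Int × Int,
    ∃ v, t.foldl (fun acc x => match acc with
      | none => some x
      | some m => if pvHeapLt x m then some x else some m) (some m) = some v ∧
      (v = m ∨ v ∈ t) ∧ v.1 ≤ m.1 ∧ ∀ x ∈ t, v.1 ≤ x.1 := by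
  induction t with
  | nil => intro m; exact ⟨m, rfl, Or.inl rfl, le_refl _, by simp⟩
  | cons x tt ih =>
    intro m
    simp only [List.foldl_cons]
    by_cases hlt : pvHeapLt x m
    · obtain ⟨v, hv, hmem, hle, hall⟩ := ih x
      have hxm : x.1 ≤ m.1 := by
        simp only [pvHeapLt, Bool.or_eq_true, decide_eq_true_eq, Bool.and_eq_true, beq_iff_eq] at hlt
        omega
      refine ⟨v, by simp [hlt, hv], ?_, by omega, ?_⟩
      · rcases hmem with h' | h' <;> simp [h']
      · intro y hy
        rcases List.mem_cons.mp hy with h' | h'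
        · subst h'; omega
        · exact hall y h'
    · obtain ⟨v, hv, hmem, hle, hall⟩ := ih m
      have hmx : m.1 ≤ x.1 := by
        simp only [pvHeapLt, Bool.or_eq_true, decide_eq_true_eq, Bool.and_eq_true, beq_iff_eq] at hlt
        push_neg at hlt
        omega
      refine ⟨v, by simp [hlt, hv], ?_, hle, ?_⟩
      · rcases hmem with h' | h' <;> simp [h']
      · intro y hy
        rcases List.mem_cons.mp hy with h' | h'
        · subst h'; omega
        · exact hall y h'

lemma pvHeapMin?_spec (h : List (Int × Int)) (hne : h ≠ []) :
    ∃ v, pvHeapMin? h = some v ∧ v ∈ h ∧ ∀ x ∈ h, v.1 ≤ x.1 := by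
  match h with
  | [] => exact absurd rfl hne
  | x :: t =>
    obtain ⟨v, hv, hmem, hle, hall⟩ := pvHeapMin?_aux t x
    refine ⟨v, by simpa [pvHeapMin?] using hv, ?_, ?_⟩
    · rcases hmem with h' | h' <;> simp [h']
    · intro y hy
      rcases List.mem_cons.mp hy with h' | h'
      · subst h'; omega
      · exact hall y h'

-- pvHeapMax? returns an element whose count is the running max of counts
lemma pvHeapMax?_aux (t : List (Int × Int)) : ∀ m : Int × Int,
    ∃ v, t.foldl (fun acc x => match acc with
      | none => some x
      | some m => if pvHeapLt m x then some x else some m) (some m) = some v ∧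
      v.1 = t.foldr (fun x r => max x.1 r) m.1 := by
  induction t with
  | nil => intro m; exact ⟨m, rfl, rfl⟩
  | cons x tt ih =>
    intro m
    simp only [List.foldl_cons, List.foldr_cons]
    by_cases hlt : pvHeapLt m x
    · obtain ⟨v, hv, hval⟩ := ih x
      have hxm : m.1 ≤ x.1 := by
        simp only [pvHeapLt, Bool.or_eq_true, decide_eq_true_eq, Bool.and_eq_true, beq_iff_eq] at hlt
        omega
      refine ⟨v, by simp [hlt, hv], ?_⟩
      rw [hval]
      have : x.1 = max m.1 x.1 := by omega
      rw [this, max_comm m.1 x.1, pvFoldrMax_init]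
      omega
    · obtain ⟨v, hv, hval⟩ := ih m
      have hmx : x.1 ≤ m.1 := by
        simp only [pvHeapLt, Bool.or_eq_true, decide_eq_true_eq, Bool.and_eq_true, beq_iff_eq] at hlt
        push_neg at hlt
        omega
      refine ⟨v, by simp [hlt, hv], ?_⟩
      rw [hval]
      have : m.1 = max x.1 m.1 := by omega
      rw [this, pvFoldrMax_init]
      omega

lemma pvHeapMax?_spec (h : List (Int × Int)) (hne : h ≠ []) (hnn : ∀ x ∈ h, 0 ≤ x.1) :
    ∃ v, pvHeapMax? h = some v ∧ v.1 = pvMaxF h := by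
  match h with
  | [] => exact absurd rfl hne
  | x :: t =>
    obtain ⟨v, hv, hval⟩ := pvHeapMax?_aux t x
    refine ⟨v, by simpa [pvHeapMax?] using hv, ?_⟩
    rw [hval]
    have hx : (0 : Int) ≤ x.1 := hnn x (by simp)
    have : x.1 = max x.1 0 := by omega
    simp only [pvMaxF, List.foldr_cons]
    rw [this, pvFoldrMax_init]
    omega

-- the inner while loop consumes exactly the cranes that can lift `box`
lemma pvFill_spec (b : Int) : ∀ (d : List Int) (heap : List (Int × Int)),
    pvFill d.reverse heap b =
      ((d.drop ((d.takeWhile (fun c => b ≤ c)).length)).reverse,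
       heap ++ (d.takeWhile (fun c => b ≤ c)).map (fun c => ((0 : Int), c))) := by
  intro d
  induction d with
  | nil => intro heap; rw [pvFill]; simp
  | cons c t ih =>
    intro heap
    rw [pvFill]
    split
    next heq =>
      rw [List.reverse_cons, List.getLast?_concat] at heq
      exact absurd heq (by simp)
    next c1 heq =>
      rw [List.reverse_cons, List.getLast?_concat] at heq
      injection heq with h'
      subst h'
      simp only [List.reverse_cons, List.dropLast_concat]
      by_cases hbc : b ≤ c
      · rw [if_pos hbc, ih]
        simp [List.takeWhile_cons, hbc]
      · rw [if_neg hbc]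
        simp [List.takeWhile_cons, hbc]

-- the two-pointer advance counts the same cranes
lemma pvAdvance_spec (cs : List Int) (b : Int) : ∀ (n p : Nat), cs.length - p = n →
    pvAdvance cs b p = p + ((cs.drop p).takeWhile (fun c => b ≤ c)).length := by
  intro n
  induction n with
  | zero =>
    intro p hp
    rw [pvAdvance]
    have hlen : cs.length ≤ p := by omega
    rw [dif_neg (by omega)]
    simp [List.drop_eq_nil_of_le hlen]
  | succ n ih =>
    intro p hp
    have hplt : p < cs.length := by omega
    rw [pvAdvance, dif_pos hplt]
    have hdrop : cs.drop p = cs[p] :: cs.drop (p + 1) := (List.getElem_cons_drop hplt).symm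
    by_cases hb : b ≤ cs[p]
    · rw [if_pos hb, ih (p + 1) (by omega)]
      have htw : (cs.drop p).takeWhile (fun c => b ≤ c) =
          cs[p] :: ((cs.drop (p + 1)).takeWhile (fun c => b ≤ c)) := by
        rw [hdrop, List.takeWhile_cons, if_pos (by simpa using hb)]
      rw [htw, List.length_cons]
      omega
    · rw [if_neg hb]
      have htw : (cs.drop p).takeWhile (fun c => b ≤ c) = [] := by
        rw [hdrop, List.takeWhile_cons, if_neg (by simpa using hb)]
      rw [htw]
      rfl

-- ceiling division -(-(i+1) // p) brackets
lemma pvNeed_bounds (i : Nat) (p : Nat) (hp : 1 ≤ p) :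
    ((-(PySem.Int.floordiv (-((i : Int) + 1)) (p : Int))) - 1) * (p : Int) < (i : Int) + 1 ∧
    (i : Int) + 1 ≤ (-(PySem.Int.floordiv (-((i : Int) + 1)) (p : Int))) * (p : Int) := by
  have hpos : (0 : Int) < (p : Int) := by exact_mod_cast hp
  exact (PySem.Int.neg_floordiv_neg_eq_iff_of_pos hpos).mp rfl

-- the heart of the proof: one step of A's heap loop computes max(ans, ceil((i+1)/p'))
lemma pvLoop_sim : ∀ (bs cs : List Int) (p i : Nat) (heap : List (Int × Int)) (ans : Int),
    p ≤ cs.length →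
    heap.length = p →
    pvSumF heap = (i : Int) →
    (∀ x ∈ heap, 0 ≤ x.1) →
    pvMaxF heap = ans →
    (∀ b ∈ bs, 1 ≤ p ∨ ∃ c0, cs.head? = some c0 ∧ b ≤ c0) →
    ∃ hF, pvLoop bs ((cs.drop p).reverse) heap = some hF ∧
      (∀ x ∈ hF, 0 ≤ x.1) ∧ heap.length ≤ hF.length ∧ (bs ≠ [] → 1 ≤ hF.length) ∧
      pvMaxF hF = pvBLoop cs bs i p ans := by
  intro bs
  induction bs with
  | nil =>
    intro cs p i heap ans _ _ _ hnn hmax _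
    exact ⟨heap, rfl, hnn, le_refl _, by simp, by simpa [pvBLoop] using hmax⟩
  | cons b rest ih =>
    intro cs p i heap ans hple hlen hsum hnn hmax hne
    -- the fill step
    set tw := (cs.drop p).takeWhile (fun c => b ≤ c) with htw
    set k := tw.length with hk
    have hfill := pvFill_spec b (cs.drop p) heap
    set heap1 := heap ++ tw.map (fun c => ((0 : Int), c)) with hheap1
    set p' := p + k with hp'
    have hkle : k ≤ cs.length - p := by
      have h1 : k ≤ (cs.drop p).length := by
        rw [hk, htw]; exact (List.takeWhile_prefix _).length_le
      simpa using h1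
    have hp'le : p' ≤ cs.length := by omega
    have hlen1 : heap1.length = p' := by simp [hheap1, hlen, hp', hk]
    have hsum1 : pvSumF heap1 = (i : Int) := by rw [hheap1, pvSumF_zeros, hsum]
    have hmax1 : pvMaxF heap1 = ans := by rw [hheap1, pvMaxF_zeros, hmax]
    have hnn1 : ∀ x ∈ heap1, 0 ≤ x.1 := by
      intro x hx
      rcases List.mem_append.mp hx with h' | h'
      · exact hnn x h'
      · obtain ⟨c, _, hc⟩ := List.mem_map.mp h'
        rw [← hc]
    -- p' ≥ 1
    have hp'pos : 1 ≤ p' := by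
      rcases hne b (by simp) with h1 | ⟨c0, hc0, hbc0⟩
      · omega
      · by_cases hp1 : 1 ≤ p
        · omega
        · have hp0 : p = 0 := by omega
          have hcs : cs.drop p = cs := by rw [hp0]; rfl
          obtain ⟨t, ht⟩ : ∃ t, cs = c0 :: t := by
            cases cs with
            | nil => simp at hc0
            | cons a t =>
              simp only [List.head?_cons, Option.some.injEq] at hc0
              exact ⟨t, by rw [hc0]⟩
          have : tw = c0 :: t.takeWhile (fun c => b ≤ c) := by
            rw [htw, hcs, ht, List.takeWhile_cons, if_pos (by simpa using hbc0)]
          have : k ≥ 1 := by rw [hk, this]; simp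
          omega
    have hne1 : heap1 ≠ [] := by
      intro e
      have : heap1.length = 0 := by rw [e]; rfl
      omega
    -- pop the min
    obtain ⟨v, hv, hvmem, hvmin⟩ := pvHeapMin?_spec heap1 hne1
    set heap2 := heap1.erase v ++ [(v.1 + 1, v.2)] with hheap2
    have hlen2 : heap2.length = p' := by
      have := List.length_erase_of_mem hvmem
      simp only [hheap2, List.length_append, List.length_singleton, this, hlen1]
      omega
    have hsum2 : pvSumF heap2 = (i : Int) + 1 := by
      rw [hheap2, pvSumF_concat]
      have := pvSumF_erase heap1 v hvmem
      simp only at *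
      omega
    have hnn2 : ∀ x ∈ heap2, 0 ≤ x.1 := by
      intro x hx
      rcases List.mem_append.mp hx with h' | h'
      · exact hnn1 x (List.mem_of_mem_erase h')
      · have hv0 : 0 ≤ v.1 := hnn1 v hvmem
        simp only [List.mem_singleton] at h'
        rw [h']
        show (0 : Int) ≤ v.1 + 1
        omega
    have hmax2 : pvMaxF heap2 = max ans (v.1 + 1) := by
      rw [hheap2, pvMaxF_concat]
      have := pvMaxF_erase heap1 v hvmem
      rw [hmax1] at this
      omega
    -- the arithmetic: max(ans, v.1+1) = max(ans, need)
    set need := -(PySem.Int.floordiv (-((i : Int) + 1)) ((p' : Nat) : Int)) with hneed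
    obtain ⟨hnb1, hnb2⟩ := pvNeed_bounds i p' hp'pos
    have hvsum : v.1 * ((p' : Nat) : Int) ≤ (i : Int) := by
      have := pv_mul_le_sum heap1 v.1 hvmin
      rw [hsum1, hlen1] at this
      exact this
    have hmaxsum : (i : Int) + 1 ≤ pvMaxF heap2 * ((p' : Nat) : Int) := by
      have := pv_sum_le_mul heap2 (pvMaxF heap2) (fun x hx => le_pvMaxF heap2 x hx)
      rw [hsum2, hlen2] at this
      exact this
    have hppos : (0 : Int) < ((p' : Nat) : Int) := by exact_mod_cast hp'pos
    have hv1need : v.1 + 1 ≤ need := by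
      by_contra hcon
      push_neg at hcon
      have h1 : need ≤ v.1 := by omega
      have h2 : need * ((p' : Nat) : Int) ≤ v.1 * ((p' : Nat) : Int) :=
        mul_le_mul_of_nonneg_right h1 (le_of_lt hppos)
      linarith
    have hneedmax : need ≤ pvMaxF heap2 := by
      by_contra hcon
      push_neg at hcon
      have h1 : pvMaxF heap2 ≤ need - 1 := by omega
      have h2 : pvMaxF heap2 * ((p' : Nat) : Int) ≤ (need - 1) * ((p' : Nat) : Int) :=
        mul_le_mul_of_nonneg_right h1 (le_of_lt hppos)
      linarith
    have hstep : pvMaxF heap2 = max ans need := by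
      rw [hmax2] at *
      omega
    -- the advance step matches
    have hadv : pvAdvance cs b p = p' := by
      rw [pvAdvance_spec cs b (cs.length - p) p rfl, ← htw, ← hk]
    -- recurse
    obtain ⟨hF, hloop, hFnn, hFlen, _, hFmax⟩ :=
      ih cs p' (i + 1) heap2 (max ans need) hp'le hlen2
        (by push_cast; omega) hnn2 hstep
        (fun b' _ => Or.inl hp'pos)
    refine ⟨hF, ?_, hFnn, ?_, ?_, ?_⟩
    · -- unfold one step of pvLoop
      rw [pvLoop]
      simp only [hfill, hheap1]
      rw [hv]
      have hd : (cs.drop p).drop k = cs.drop p' := by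
        rw [List.drop_drop]
      simpa [hd, ← hheap2] using hloop
    · rw [hlen, hlen2] at *; omega
    · intro _; rw [hlen2] at hFlen; omega
    · rw [hFmax, pvBLoop]
      simp only [hadv, ← hneed]
      congr 1
      omega

-- ===== VERDICT (by name: the statement is the Claim_ definition above) =====
theorem solve_spec : Claim_equal_solve := by
  unfold Claim_equal_solve
  intro cranes boxes _ hpre
  obtain ⟨hcne, hbne⟩ := hpre
  unfold Spec_solve
  simp only [solve, solve_alt]
  set csA := PySem.List.sorted cranes (fun x => x) false with hcsA
  set csB := PySem.List.sorted cranes (fun x => x) true with hcsB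
  set bs := PySem.List.sorted boxes (fun x => x) true with hbs
  -- ascending sort is the reverse of the descending sort
  have hAB : csA = csB.reverse := by
    apply PySem.List.sorted_id_eq_of_perm_of_pairwise
    · exact (List.reverse_perm csB).trans (PySem.List.sorted_perm ..)
    · exact List.pairwise_reverse.mpr (PySem.List.sorted_pairwise_rev ..)
  have hcBne : csB ≠ [] := by
    intro e
    exact hcne ((PySem.List.sorted_eq_nil_iff ..).mp e)
  have hbsne : bs ≠ [] := by
    intro e
    exact hbne ((PySem.List.sorted_eq_nil_iff ..).mp e)
  obtain ⟨c0, tcs, hcs⟩ := List.exists_cons_of_ne_nil hcBne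
  obtain ⟨b0, tbs, hbs0⟩ := List.exists_cons_of_ne_nil hbsne
  have hget1 : PySem.List.pyGet? csA (-1) = some c0 := by
    rw [hAB, PySem.List.pyGet?_neg_one, List.getLast?_reverse, hcs]
    rfl
  have hget2 : PySem.List.pyGet? bs 0 = some b0 := by
    rw [hbs0]; exact PySem.List.pyGet?_zero_cons ..
  have hget3 : PySem.List.pyGet? csB 0 = some c0 := by
    rw [hcs]; exact PySem.List.pyGet?_zero_cons ..
  rw [hget1, hget2, hget3]
  simp only [Option.bind_some, Option.map_some, Option.getD_some]
  by_cases hlt : c0 < b0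
  · rw [if_pos hlt, if_pos hlt]
  · rw [if_neg hlt, if_neg hlt]
    -- every box is liftable-or-not bounded by the strongest crane
    have hbox : ∀ b ∈ bs, b ≤ c0 := by
      intro b hb
      have h1 : b ≤ b0 := by
        have := PySem.List.key_head_sorted_rev_ge boxes (fun x => x) hbs0
        exact this b ((PySem.List.mem_sorted ..).mp hb)
      omega
    obtain ⟨hF, hloop, hFnn, _, hFne1, hFmax⟩ :=
      pvLoop_sim bs csB 0 0 [] 0 (Nat.zero_le _) rfl (by simp [pvSumF]) (by simp) rfl
        (fun b hb => Or.inr ⟨c0, by rw [hcs]; rfl, hbox b hb⟩)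
    have hloopA : pvLoop bs csA [] = some hF := by
      rw [hAB]; simpa using hloop
    have hFne : hF ≠ [] := by
      have := hFne1 (by rw [hbs0]; simp)
      intro e
      rw [e] at this
      simp at this
    obtain ⟨v, hvmax, hvval⟩ := pvHeapMax?_spec hF hFne hFnn
    rw [hloopA]
    simp only [hvmax]
    rw [hvval, hFmax]
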